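-- pv_equiv track=rewrite | github.com/vokynator/python | kakuro/kakuro.py | cells_from_partial
-- ===== SOURCE A (Python) =====
-- from typing import List, Tuple, Optional
--
-- def cells_from_partial(total: int, partial: List[int]) -> List[List[int]]:
--     nums = list(range(1,10))
--     length = len(partial)
--     pos_lists = []
--     result: List[List[int]] = []
--     cells_sum = total
--     for num in partial:
--         if num != 0:
--             if num not in nums:
--                 return []
--             nums.remove(num)
--             length -= 1
--             total -= num
--     if partial.count(0) == 0 and sum(partial) == cells_sum:
--         return [partial]
--     pos_nums = poss_nums(nums, total, length, [], [])
--     for nums in pos_nums: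
--         pos_lists += permutations(nums)
--     for possibility in pos_lists:
--         index = 0
--         result_kind = []
--         for num in partial:
--             if num == 0:
--                 result_kind.append(possibility[index])
--                 index += 1
--             else:
--                 result_kind.append(num)
--         result.append(result_kind)
--     return sorted(result)
--
-- def poss_nums(nums: List[int], total: int, length: int,
--               part: List[int],
--               result: List[List[int]]) -> List[List[int]]:
--     if sum(part) > total or len(part) > length:
--         return []
--     if sum(part) == total and len(part) == length:
--         result.append(part)
--         return result
--     for i, j in enumerate(nums):
--         rest = nums[i + 1:]
--         poss_nums(rest, total, length, part + [j], result)
--     return result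
--
-- def permutations(list_num: List[int]) -> List[List[int]]:
--     if len(list_num) == 1:
--         return [list_num]
--     oder = []
--     for i in range(len(list_num)):
--         num = list_num[i]
--         rest = list_num[:i] + list_num[i+1:]
--         for j in permutations(rest):
--             oder.append([num] + j)
--     return oder
-- ===== SOURCE B (Python) =====
-- from typing import List
--
-- def _kperms(pool: List[int], k: int):
--     # all length-k ordered selections of distinct positions of pool, itertools order
--     if k == 0:
--         yield []
--     else:
--         for i, x in enumerate(pool):
--             for rest in _kperms(pool[:i] + pool[i + 1:], k - 1):
--                 yield [x] + rest
--
-- def cells_from_partial(total: int, partial: List[int]) -> List[List[int]]: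
--     pool = list(range(1, 10))
--     remaining = total
--     zero_count = 0
--     for num in partial:
--         if num == 0:
--             zero_count += 1
--         else:
--             if num not in pool:
--                 return []
--             pool.remove(num)
--             remaining -= num
--     if zero_count == 0 and sum(partial) == total:
--         return [partial]
--     result = []
--     for perm in _kperms(pool, zero_count):
--         if sum(perm) == remaining:
--             it = iter(perm)
--             result.append([next(it) if num == 0 else num for num in partial])
--     return sorted(result)
-- ===== Notes on version B (the rewrite author's own statement) =====
-- stated objective: simpler
-- what changed: A enumerates subset-combinations of the digit pool recursively and then expands each with a hand-written full-permutation routine; B collapses both stages into one filtered enumeration of the k-permutations of the pool (itertools-style), substituting each matching permutation into the zero slots directly.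
import Mathlib
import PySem

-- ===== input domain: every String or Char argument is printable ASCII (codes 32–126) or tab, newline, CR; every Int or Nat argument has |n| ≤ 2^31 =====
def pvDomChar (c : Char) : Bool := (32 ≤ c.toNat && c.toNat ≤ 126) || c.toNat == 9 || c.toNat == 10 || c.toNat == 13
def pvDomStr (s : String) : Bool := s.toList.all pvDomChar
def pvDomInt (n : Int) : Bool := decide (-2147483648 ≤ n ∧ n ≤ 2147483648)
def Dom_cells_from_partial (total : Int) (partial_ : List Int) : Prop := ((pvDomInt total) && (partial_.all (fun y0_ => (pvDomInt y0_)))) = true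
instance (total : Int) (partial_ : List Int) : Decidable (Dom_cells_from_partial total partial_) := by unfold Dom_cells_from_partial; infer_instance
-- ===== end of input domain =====

-- B replaces A's two-stage search (recursive subset enumeration, then a hand-written
-- full-permutation pass over each subset) by a single filtered enumeration of the
-- k-permutations of the remaining digit pool (itertools-style); objective: simpler.

-- ===== PORT A =====
-- poss_nums: the Python mutates its `result` list in place; the port threads it.
-- The pruning `return []` leaves the caller's `result` unchanged, so it returns `result`
-- (at top level result is [] there, which is what Python returns).
mutual
def possNums (nums : List Int) (total length : Int) (part : List Int) (result : List (List Int)) : List (List Int) :=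
  if part.sum > total ∨ (part.length : Int) > length then result
  else if part.sum = total ∧ (part.length : Int) = length then result ++ [part]
  else possLoop nums total length part result
termination_by (nums.length, 1)
decreasing_by all_goals simp_wf <;> omega
def possLoop (nums : List Int) (total length : Int) (part : List Int) (result : List (List Int)) : List (List Int) :=
  match nums with
  | [] => result
  | j :: rest => possLoop rest total length part (possNums rest total length (part ++ [j]) result)
termination_by (nums.length, 0)
decreasing_by all_goals simp_wf <;> omega
end

-- permutations: the loop body slices list_num[:i] + list_num[i+1:] (exact as take/drop
-- since 0 ≤ i < len) and extends `oder`; ported as the index recursion permsAGo.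
mutual
def permsA (l : List Int) : List (List Int) :=
  if l.length = 1 then [l] else permsAGo l 0
termination_by (l.length, l.length + 2)
decreasing_by all_goals simp_wf <;> omega
def permsAGo (l : List Int) (i : Nat) : List (List Int) :=
  if h : i < l.length then
    (permsA (l.take i ++ l.drop (i + 1))).map (fun j => l[i] :: j) ++ permsAGo l (i + 1)
  else []
termination_by (l.length, l.length - i + 1)
decreasing_by all_goals simp_wf <;> (try simp) <;> omega
end

-- the first for-loop of A: early `return []` becomes none; nums.remove(num) is
-- List.erase (first occurrence) guarded by the membership test, as in the Python.
def preprocA : List Int → List Int → Int → Int → Option (List Int × Int × Int)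
  | [], nums, length, total => some (nums, length, total)
  | num :: rest, nums, length, total =>
    if num ≠ 0 then
      if num ∉ nums then none
      else preprocA rest (nums.erase num) (length - 1) (total - num)
    else preprocA rest nums length total

-- the inner substitution loop of A: walks partial with a running index into possibility;
-- possibility[index] is PySem.List.pyGetD (always in range in reachable states).
def substA (poss : List Int) : List Int → Nat → List Int
  | [], _ => []
  | num :: rest, idx =>
    if num = 0 then PySem.List.pyGetD poss idx 0 :: substA poss rest (idx + 1)
    else num :: substA poss rest idx

def cells_from_partial (total : Int) (partial_ : List Int) : List (List Int) :=
  match preprocA partial_ (PySem.List.pyRange 1 10 1) (PySem.List.len partial_) total with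
  | none => []
  | some (nums, length, total') =>
    if PySem.List.count partial_ 0 = 0 ∧ partial_.sum = total then [partial_]
    else
      let posNums := possNums nums total' length [] []
      let posLists := posNums.foldl (fun acc ns => acc ++ permsA ns) []
      let result := posLists.foldl (fun res poss => res ++ [substA poss partial_ 0]) []
      PySem.List.sorted result (fun x => x)

-- ===== PORT B =====
def preprocB : List Int → List Int → Int → Nat → Option (List Int × Int × Nat)
  | [], pool, remaining, zc => some (pool, remaining, zc)
  | num :: rest, pool, remaining, zc =>
    if num = 0 then preprocB rest pool remaining (zc + 1)
    else if num ∈ pool then preprocB rest (pool.erase num) (remaining - num) zc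
    else none

-- B's list comprehension with an iterator over perm: consumes the head at each zero slot.
def substB : List Int → List Int → List Int
  | [], _ => []
  | num :: rest, perm =>
    if num = 0 then perm.headD 0 :: substB rest perm.tail
    else num :: substB rest perm

def cells_from_partial_alt (total : Int) (partial_ : List Int) : List (List Int) :=
  match preprocB partial_ (PySem.List.pyRange 1 10 1) total 0 with
  | none => []
  | some (pool, remaining, zc) =>
    if zc = 0 ∧ partial_.sum = total then [partial_]
    else
      let result := (PySem.List.permutations pool zc).foldl
        (fun res perm => if perm.sum = remaining then res ++ [substB partial_ perm] else res) []
      PySem.List.sorted result (fun x => x)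

-- ===== PRECONDITION & SPEC =====
def Spec_cells_from_partial (total : Int) (partial_ : List Int) (out : List (List Int)) : Prop := out = cells_from_partial_alt total partial_
instance (total : Int) (partial_ : List Int) (out : List (List Int)) : Decidable (Spec_cells_from_partial total partial_ out) := by unfold Spec_cells_from_partial; infer_instance

-- ===== CLAIM (what is proved, stated in full; the proofs are below) =====
def Claim_equal_cells_from_partial : Prop := ∀ (total : Int) (partial_ : List Int), Dom_cells_from_partial total partial_ → Spec_cells_from_partial total partial_ (cells_from_partial total partial_)

-- ===== LEMMAS AND PROOFS =====

-- sorted(-) with the identity key only depends on the multiset of the input.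
theorem sorted_id_congr_perm (xs ys : List (List Int)) (h : xs.Perm ys) :
    PySem.List.sorted xs (fun x => x) = PySem.List.sorted ys (fun x => x) := by
  have t := PySem.List.sorted_eq_sorted_of_perm (κ := List Int) xs ys (fun x => x)
    (fun a b hh => hh) h
  convert t using 2

-- ---- preprocessing ----

theorem preproc_rel (ps : List Int) : ∀ (nums : List Int) (length total : Int) (zc : Nat),
    preprocA ps nums length total =
      (preprocB ps nums total zc).map
        (fun x => (x.1, length - PySem.List.len ps + ((x.2.2 : Int) - (zc : Int)), x.2.1)) := by
  induction ps with
  | nil => intro nums length total zc; simp [preprocA, preprocB, Option.map]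
  | cons num rest ih =>
    intro nums length total zc
    rw [preprocA, preprocB]
    by_cases h0 : num = 0
    · rw [if_neg (by simp [h0]), if_pos h0, ih nums length total (zc + 1)]
      cases preprocB rest nums total (zc + 1) with
      | none => rfl
      | some x =>
        obtain ⟨p, r', z⟩ := x
        simp only [Option.map_some, PySem.List.len_eq, List.length_cons]
        congr 2
        push_cast
        ring
    · rw [if_pos h0, if_neg h0]
      by_cases hmem : num ∈ nums
      · rw [if_neg (by simpa using hmem), if_pos hmem]
        rw [ih (nums.erase num) (length - 1) (total - num) zc]
        cases preprocB rest (nums.erase num) (total - num) zc with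
        | none => rfl
        | some x =>
          obtain ⟨p, r', z⟩ := x
          simp only [Option.map_some, PySem.List.len_eq, List.length_cons]
          congr 2
          push_cast
          ring
      · rw [if_pos (by simpa using hmem), if_neg hmem]
        rfl

theorem preprocB_facts (ps : List Int) : ∀ (pool : List Int) (t : Int) (zc : Nat)
    (pool' : List Int) (r : Int) (z : Nat),
    preprocB ps pool t zc = some (pool', r, z) →
      z = zc + PySem.List.count ps 0 ∧ r = t - ps.sum ∧
      (pool.Nodup → pool'.Nodup) ∧ (∀ x ∈ pool', x ∈ pool) := by
  induction ps with
  | nil =>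
    intro pool t zc pool' r z h
    rw [preprocB] at h
    injection h with h
    injection h with h1 h2
    injection h2 with h2 h3
    subst h1; subst h2; subst h3
    simp [PySem.List.count]
  | cons num rest ih =>
    intro pool t zc pool' r z h
    rw [preprocB] at h
    by_cases h0 : num = 0
    · subst h0
      rw [if_pos rfl] at h
      obtain ⟨hz, hr, hnd, hsub⟩ := ih pool t (zc + 1) pool' r z h
      refine ⟨?_, ?_, hnd, hsub⟩
      · rw [hz]; simp [PySem.List.count]; omega
      · rw [hr]; simp
    · rw [if_neg h0] at h
      by_cases hmem : num ∈ pool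
      · rw [if_pos hmem] at h
        obtain ⟨hz, hr, hnd, hsub⟩ := ih (pool.erase num) (t - num) zc pool' r z h
        refine ⟨?_, ?_, ?_, ?_⟩
        · rw [hz]; simp [PySem.List.count, h0]
        · rw [hr]; simp; ring
        · intro hp; exact hnd (hp.erase num)
        · intro x hx; exact List.mem_of_mem_erase (hsub x hx)
      · rw [if_neg hmem] at h; exact absurd h (by simp)

-- ---- substitution ----

theorem substA_eq_substB (ps : List Int) : ∀ (poss : List Int) (k : Nat),
    substA poss ps k = substB ps (poss.drop k) := by
  induction ps with
  | nil => intro poss k; rfl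
  | cons num rest ih =>
    intro poss k
    rw [substA, substB]
    by_cases h0 : num = 0
    · subst h0
      rw [if_pos rfl, if_pos rfl]
      congr 1
      · rw [PySem.List.pyGetD_natCast]
        rw [List.getD_eq_getElem?_getD, List.headD_eq_head?_getD, List.head?_drop]
      · rw [ih poss (k + 1), List.tail_drop]
    · rw [if_neg h0, if_neg h0, ih poss k]

-- ---- poss_nums: unfolding, accumulator, membership, nodup ----

theorem possNums_eq (nums : List Int) (t k : Int) (part : List Int) (res : List (List Int)) :
    possNums nums t k part res =
      if part.sum > t ∨ (part.length : Int) > k then res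
      else if part.sum = t ∧ (part.length : Int) = k then res ++ [part]
      else possLoop nums t k part res := by
  rw [possNums]

theorem possLoop_nil (t k : Int) (part : List Int) (res : List (List Int)) :
    possLoop [] t k part res = res := by rw [possLoop]

theorem possLoop_cons (j : Int) (rest : List Int) (t k : Int) (part : List Int) (res : List (List Int)) :
    possLoop (j :: rest) t k part res = possLoop rest t k part (possNums rest t k (part ++ [j]) res) := by
  rw [possLoop]


theorem poss_acc (nums : List Int) : ∀ (t k : Int) (part : List Int) (res : List (List Int)),
    possNums nums t k part res = res ++ possNums nums t k part [] ∧
    possLoop nums t k part res = res ++ possLoop nums t k part [] := by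
  induction nums with
  | nil =>
    intro t k part res
    constructor
    · rw [possNums_eq, possNums_eq]
      split_ifs <;> simp [possLoop_nil]
    · simp [possLoop_nil]
  | cons j rest ih =>
    intro t k part res
    have hloop : possLoop (j :: rest) t k part res = res ++ possLoop (j :: rest) t k part [] := by
      rw [possLoop_cons, possLoop_cons]
      rw [(ih t k (part ++ [j]) res).1]
      rw [(ih t k part (res ++ possNums rest t k (part ++ [j]) [])).2]
      rw [(ih t k part (possNums rest t k (part ++ [j]) [])).2]
      simp
    refine ⟨?_, hloop⟩
    rw [possNums_eq, possNums_eq]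
    split_ifs <;> simp [hloop]

theorem poss_mem (nums : List Int) : (∀ x ∈ nums, 0 < x) → ∀ (t k : Int) (part s : List Int),
    (s ∈ possNums nums t k part [] ↔
      ∃ u, u.Sublist nums ∧ s = part ++ u ∧ part.sum + u.sum = t ∧
        (part.length : Int) + (u.length : Int) = k) ∧
    (s ∈ possLoop nums t k part [] ↔
      ∃ u, u.Sublist nums ∧ u ≠ [] ∧ s = part ++ u ∧ part.sum + u.sum = t ∧
        (part.length : Int) + (u.length : Int) = k) := by
  induction nums with
  | nil =>
    intro _ t k part s
    constructor
    · rw [possNums_eq]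
      split_ifs with h1 h2
      · simp only [List.not_mem_nil, false_iff]
        rintro ⟨u, hu, rfl, hsum, hlen⟩
        rw [List.sublist_nil] at hu
        subst hu
        simp at hsum hlen
        omega
      · simp only [List.nil_append, List.mem_singleton]
        constructor
        · rintro rfl; exact ⟨[], List.nil_sublist _, by simp, by simpa using h2.1, by simpa using h2.2⟩
        · rintro ⟨u, hu, rfl, _, _⟩
          rw [List.sublist_nil] at hu; subst hu; simp
      · rw [possLoop_nil]
        simp only [List.not_mem_nil, false_iff]
        rintro ⟨u, hu, rfl, hsum, hlen⟩
        rw [List.sublist_nil] at hu; subst hu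
        simp at hsum hlen
        exact h2 ⟨by omega, by omega⟩
    · rw [possLoop_nil]
      simp only [List.not_mem_nil, false_iff]
      rintro ⟨u, hu, hne, _⟩
      rw [List.sublist_nil] at hu; exact hne hu
  | cons j rest ih =>
    intro hpos t k part s
    have hj : 0 < j := hpos j (by simp)
    have hrest : ∀ x ∈ rest, 0 < x := fun x hx => hpos x (by simp [hx])
    have ihr := ih hrest t k
    have hloop : s ∈ possLoop (j :: rest) t k part [] ↔
        ∃ u, u.Sublist (j :: rest) ∧ u ≠ [] ∧ s = part ++ u ∧ part.sum + u.sum = t ∧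
          (part.length : Int) + (u.length : Int) = k := by
      rw [possLoop_cons, (poss_acc rest t k part (possNums rest t k (part ++ [j]) [])).2]
      rw [List.mem_append]
      rw [(ihr (part ++ [j]) s).1, (ihr part s).2]
      constructor
      · rintro (⟨u, hu, rfl, hsum, hlen⟩ | ⟨u, hu, hne, rfl, hsum, hlen⟩)
        · exact ⟨j :: u, (List.cons_sublist_cons ..).mpr hu |>.trans (List.Sublist.refl _) |>.trans (by rfl) |> fun h => h, by simp, by simp, by simp at hsum ⊢; omega, by simp at hlen ⊢; omega⟩
        · exact ⟨u, hu.trans (List.sublist_cons_self j rest), hne, rfl, hsum, hlen⟩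
      · rintro ⟨u, hu, hne, rfl, hsum, hlen⟩
        rcases (List.sublist_cons_iff).mp hu with h | ⟨u', rfl, hu'⟩
        · exact Or.inr ⟨u, h, hne, rfl, hsum, hlen⟩
        · exact Or.inl ⟨u', hu', by simp, by simp at hsum ⊢; omega, by simp at hlen ⊢; omega⟩
    constructor
    · rw [possNums_eq]
      split_ifs with h1 h2
      · simp only [List.not_mem_nil, false_iff]
        rintro ⟨u, hu, rfl, hsum, hlen⟩
        have h0 : 0 ≤ u.sum := List.sum_nonneg fun x hx => le_of_lt (hpos x (hu.mem hx))
        have : (0:Int) ≤ u.length := by positivity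
        omega
      · simp only [List.nil_append, List.mem_singleton]
        constructor
        · rintro rfl
          exact ⟨[], List.nil_sublist _, by simp, by simpa using h2.1, by simpa using h2.2⟩
        · rintro ⟨u, hu, rfl, hsum, hlen⟩
          rcases u with _ | ⟨x, u'⟩
          · simp
          · exfalso
            have h0 : 0 < (x :: u').sum :=
              List.sum_pos _ (fun y hy => hpos y (hu.mem hy)) (by simp)
            have := h2.1
            omega
      · rw [hloop]
        constructor
        · rintro ⟨u, hu, hne, rfl, hsum, hlen⟩
          exact ⟨u, hu, rfl, hsum, hlen⟩
        · rintro ⟨u, hu, rfl, hsum, hlen⟩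
          refine ⟨u, hu, ?_, rfl, hsum, hlen⟩
          rintro rfl
          simp at hsum hlen
          exact h2 ⟨by omega, by omega⟩
    · exact hloop

theorem poss_nodup (nums : List Int) : (∀ x ∈ nums, 0 < x) → nums.Nodup →
    ∀ (t k : Int) (part : List Int),
    (possNums nums t k part []).Nodup ∧ (possLoop nums t k part []).Nodup := by
  induction nums with
  | nil =>
    intro _ _ t k part
    constructor
    · rw [possNums_eq]; split_ifs <;> simp [possLoop_nil]
    · simp [possLoop_nil]
  | cons j rest ih =>
    intro hpos hnd t k part
    have hj : 0 < j := hpos j (by simp)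
    have hrest : ∀ x ∈ rest, 0 < x := fun x hx => hpos x (by simp [hx])
    have hndr : rest.Nodup := (List.nodup_cons.mp hnd).2
    have hjr : j ∉ rest := (List.nodup_cons.mp hnd).1
    have ihr := ih hrest hndr t k
    have hloop : (possLoop (j :: rest) t k part []).Nodup := by
      rw [possLoop_cons, (poss_acc rest t k part (possNums rest t k (part ++ [j]) [])).2]
      apply List.Nodup.append
      · exact (ihr (part ++ [j])).1
      · exact (ihr part).2
      · intro s hs1 hs2
        obtain ⟨u, hu, rfl, _, _⟩ := ((poss_mem rest hrest t k (part ++ [j]) _).1).mp hs1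
        obtain ⟨u', hu', hne, heq, _, _⟩ := ((poss_mem rest hrest t k part _).2).mp hs2
        rcases u' with _ | ⟨x, u''⟩
        · exact hne rfl
        · simp only [List.append_assoc, List.singleton_append] at heq
          have := List.append_cancel_left heq
          injection this with h1 _
          exact hjr (h1 ▸ hu'.mem (by simp))
    refine ⟨?_, hloop⟩
    rw [possNums_eq]
    split_ifs <;> simp [hloop]

-- ---- permutations (A's hand-written and PySem's) ----

theorem permsA_eq (l : List Int) : permsA l = if l.length = 1 then [l] else permsAGo l 0 := by
  rw [permsA]

theorem permsAGo_eq (l : List Int) (i : Nat) : permsAGo l i =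
    if h : i < l.length then
      (permsA (l.take i ++ l.drop (i + 1))).map (fun j => l[i] :: j) ++ permsAGo l (i + 1)
    else [] := by
  rw [permsAGo]

theorem cons_take_drop_perm (l : List Int) (n : Nat) (h : n < l.length) :
    (l[n] :: (l.take n ++ l.drop (n + 1))).Perm l := by
  have hsplit : l.take n ++ l[n] :: l.drop (n + 1) = l := by
    conv_rhs => rw [← List.take_append_drop n l]
    congr 1
    exact (List.drop_eq_getElem_cons h).symm
  calc (l[n] :: (l.take n ++ l.drop (n + 1))).Perm (l.take n ++ l[n] :: l.drop (n + 1)) :=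
        List.perm_middle.symm
    _ = l := hsplit

theorem permsA_mem_aux (N : Nat) : ∀ (l : List Int), l.length ≤ N → l ≠ [] →
    ∀ p, (p ∈ permsA l ↔ p.Perm l) := by
  induction N with
  | zero => intro l hl hne; cases l <;> simp_all
  | succ N ihN =>
    intro l hl hne p
    rcases Nat.lt_or_ge l.length 2 with hlen | hlen
    · -- length 1
      have h1 : l.length = 1 := by
        cases l with
        | nil => simp at hne
        | cons a t => simp at hlen ⊢; omega
      rw [permsA_eq, if_pos h1]
      simp only [List.mem_singleton]
      constructor
      · rintro rfl; exact List.Perm.refl _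
      · intro hp
        rcases l with _ | ⟨a, t⟩
        · simp at hne
        · have : t = [] := by simpa using h1
          subst this
          exact List.perm_singleton.mp hp
    · -- length ≥ 2
      have hgo : ∀ (i : Nat) (p : List Int), p ∈ permsAGo l i ↔
          ∃ n, ∃ (h : n < l.length), i ≤ n ∧
            ∃ q, p = l[n] :: q ∧ q.Perm (l.take n ++ l.drop (n + 1)) := by
        intro i
        induction hd : l.length - i using Nat.strong_induction_on generalizing i with
        | _ d ihd =>
        intro p
        rw [permsAGo_eq]
        split_ifs with hi
        · have hlength : (l.take i ++ l.drop (i + 1)).length = l.length - 1 := by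
            simp [List.length_take, List.length_drop]; omega
          have hsubne : l.take i ++ l.drop (i + 1) ≠ [] := by
            intro hnil
            rw [hnil] at hlength
            simp at hlength
            omega
          have hA := ihN (l.take i ++ l.drop (i + 1)) (by omega) hsubne
          rw [List.mem_append, List.mem_map]
          rw [ihd (l.length - (i + 1)) (by omega) (i + 1) rfl p]
          constructor
          · rintro (⟨q, hq, rfl⟩ | ⟨n, hn, hin, q, rfl, hq⟩)
            · exact ⟨i, hi, le_refl _, q, rfl, (hA q).mp hq⟩
            · exact ⟨n, hn, by omega, q, rfl, hq⟩
          · rintro ⟨n, hn, hin, q, rfl, hq⟩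
            rcases Nat.eq_or_lt_of_le hin with rfl | hlt
            · exact Or.inl ⟨q, (hA q).mpr hq, rfl⟩
            · exact Or.inr ⟨n, hn, by omega, q, rfl, hq⟩
        · simp only [List.not_mem_nil, false_iff]
          rintro ⟨n, hn, hin, _⟩
          omega
      have h1 : l.length ≠ 1 := by omega
      rw [permsA_eq, if_neg h1, hgo 0 p]
      constructor
      · rintro ⟨n, hn, _, q, rfl, hq⟩
        exact ((hq.cons l[n]).trans (cons_take_drop_perm l n hn))
      · intro hp
        rcases p with _ | ⟨x, q⟩
        · exfalso
          have := hp.length_eq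
          simp at this
          omega
        · have hx : x ∈ l := hp.subset (by simp)
          have hn : l.idxOf x < l.length := List.idxOf_lt_length_of_mem hx
          have hget : l[l.idxOf x] = x := List.getElem_idxOf hn
          refine ⟨l.idxOf x, hn, Nat.zero_le _, q, by rw [hget], ?_⟩
          have h2 : (x :: q).Perm (x :: (l.take (l.idxOf x) ++ l.drop (l.idxOf x + 1))) := by
            refine hp.trans ?_
            have := cons_take_drop_perm l (l.idxOf x) hn
            rw [hget] at this
            exact this.symm
          exact h2.cons_inv

theorem permsA_mem (l : List Int) (hne : l ≠ []) (p : List Int) :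
    p ∈ permsA l ↔ p.Perm l :=
  permsA_mem_aux l.length l (le_refl _) hne p

theorem permsAGo_mem (l : List Int) (hlen : 2 ≤ l.length) : ∀ (i : Nat) (p : List Int),
    p ∈ permsAGo l i ↔
      ∃ n, ∃ (h : n < l.length), i ≤ n ∧
        ∃ q, p = l[n] :: q ∧ q.Perm (l.take n ++ l.drop (n + 1)) := by
  intro i
  induction hd : l.length - i using Nat.strong_induction_on generalizing i with
  | _ d ihd =>
  intro p
  rw [permsAGo_eq]
  split_ifs with hi
  · have hlength : (l.take i ++ l.drop (i + 1)).length = l.length - 1 := by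
      simp [List.length_take, List.length_drop]; omega
    have hsubne : l.take i ++ l.drop (i + 1) ≠ [] := by
      intro hnil; rw [hnil] at hlength; simp at hlength; omega
    rw [List.mem_append, List.mem_map]
    rw [ihd (l.length - (i + 1)) (by omega) (i + 1) rfl p]
    constructor
    · rintro (⟨q, hq, rfl⟩ | ⟨n, hn, hin, q, rfl, hq⟩)
      · exact ⟨i, hi, le_refl _, q, rfl, (permsA_mem _ hsubne q).mp hq⟩
      · exact ⟨n, hn, by omega, q, rfl, hq⟩
    · rintro ⟨n, hn, hin, q, rfl, hq⟩
      rcases Nat.eq_or_lt_of_le hin with rfl | hlt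
      · exact Or.inl ⟨q, (permsA_mem _ hsubne q).mpr hq, rfl⟩
      · exact Or.inr ⟨n, hn, by omega, q, rfl, hq⟩
  · simp only [List.not_mem_nil, false_iff]
    rintro ⟨n, hn, hin, _⟩
    omega

theorem permsA_nodup_aux (N : Nat) : ∀ (l : List Int), l.length ≤ N → l ≠ [] → l.Nodup →
    (permsA l).Nodup := by
  induction N with
  | zero => intro l hl hne _; cases l <;> simp_all
  | succ N ihN =>
    intro l hl hne hnd
    rcases Nat.lt_or_ge l.length 2 with hlen | hlen
    · have h1 : l.length = 1 := by
        cases l with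
        | nil => simp at hne
        | cons a t => simp at hlen ⊢; omega
      rw [permsA_eq, if_pos h1]
      simp
    · have hgo : ∀ (i : Nat), (permsAGo l i).Nodup := by
        intro i
        induction hd : l.length - i using Nat.strong_induction_on generalizing i with
        | _ d ihd =>
        rw [permsAGo_eq]
        split_ifs with hi
        · have hlength : (l.take i ++ l.drop (i + 1)).length = l.length - 1 := by
            simp [List.length_take, List.length_drop]; omega
          have hsubne : l.take i ++ l.drop (i + 1) ≠ [] := by
            intro hnil; rw [hnil] at hlength; simp at hlength; omega
          have hsubnd : (l.take i ++ l.drop (i + 1)).Nodup := by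
            rw [← List.eraseIdx_eq_take_drop_succ]
            exact hnd.eraseIdx i
          apply List.Nodup.append
          · exact (ihN _ (by omega) hsubne hsubnd).map List.cons_injective
          · exact ihd (l.length - (i + 1)) (by omega) (i + 1) rfl
          · intro p hp1 hp2
            obtain ⟨q, _, rfl⟩ := List.mem_map.mp hp1
            obtain ⟨n, hn, hin, q', heq, _⟩ := (permsAGo_mem l hlen (i + 1) _).mp hp2
            injection heq with h1 _
            exact absurd ((hnd.getElem_inj_iff).mp h1) (by omega)
        · simp
      rw [permsA_eq, if_neg (by omega), ]
      exact hgo 0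

theorem permsA_nodup (l : List Int) (hne : l ≠ []) (hnd : l.Nodup) : (permsA l).Nodup :=
  permsA_nodup_aux l.length l (le_refl _) hne hnd


theorem perms_succ (xs : List Int) (r : Nat) : PySem.List.permutations xs (r+1) =
    (List.range xs.length).flatMap (fun i => match xs[i]? with
      | none => [] | some x => (PySem.List.permutations (xs.eraseIdx i) r).map (fun p => x :: p)) := by
  rw [PySem.List.permutations]
  congr 1
  funext i
  cases xs[i]? <;> rfl

theorem perms_zero (xs : List Int) : PySem.List.permutations xs 0 = [[]] := by
  rw [PySem.List.permutations]

theorem perms_mem (k : Nat) : ∀ (pool : List Int), pool.Nodup → ∀ (p : List Int),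
    (p ∈ PySem.List.permutations pool k ↔
      p.length = k ∧ p.Nodup ∧ ∀ x ∈ p, x ∈ pool) := by
  induction k with
  | zero =>
    intro pool _ p
    rw [perms_zero]
    simp only [List.mem_singleton]
    constructor
    · rintro rfl; simp
    · rintro ⟨hlen, _, _⟩
      exact List.eq_nil_of_length_eq_zero hlen
  | succ k ih =>
    intro pool hnd p
    rw [perms_succ]
    rw [List.mem_flatMap]
    constructor
    · rintro ⟨i, hi, hp⟩
      rw [List.mem_range] at hi
      rw [List.getElem?_eq_getElem hi] at hp
      simp only at hp
      obtain ⟨q, hq, rfl⟩ := List.mem_map.mp hp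
      have hnd' : (pool.eraseIdx i).Nodup := hnd.eraseIdx i
      obtain ⟨hlen, hqnd, hsub⟩ := (ih _ hnd' q).mp hq
      have hnotmem : pool[i] ∉ pool.eraseIdx i := by
        rw [List.eraseIdx_eq_take_drop_succ]
        intro hmem
        rcases List.mem_append.mp hmem with hmem | hmem
        · obtain ⟨n, hn, hget⟩ := List.getElem_of_mem hmem
          rw [List.getElem_take] at hget
          have hn' : n < pool.length := by
            have := List.length_take_le i pool
            omega
          exact absurd ((hnd.getElem_inj_iff).mp hget.symm)
            (by have := hn; simp [List.length_take] at this; omega)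
        · obtain ⟨n, hn, hget⟩ := List.getElem_of_mem hmem
          rw [List.getElem_drop] at hget
          exact absurd ((hnd.getElem_inj_iff).mp hget.symm) (by omega)
      refine ⟨by simp [hlen], ?_, ?_⟩
      · exact List.nodup_cons.mpr ⟨fun hmem => hnotmem (hsub _ hmem), hqnd⟩
      · intro x hx
        rcases List.mem_cons.mp hx with rfl | hx
        · exact List.getElem_mem hi
        · exact List.mem_of_mem_eraseIdx (hsub x hx)
    · rintro ⟨hlen, hpnd, hsub⟩
      rcases p with _ | ⟨x, q⟩
      · simp at hlen
      · have hx : x ∈ pool := hsub x (by simp)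
        have hi : pool.idxOf x < pool.length := List.idxOf_lt_length_of_mem hx
        refine ⟨pool.idxOf x, List.mem_range.mpr hi, ?_⟩
        rw [List.getElem?_eq_getElem hi]
        simp only
        rw [List.getElem_idxOf hi]
        apply List.mem_map.mpr
        refine ⟨q, ?_, rfl⟩
        apply (ih _ (hnd.eraseIdx _) q).mpr
        refine ⟨by simpa using hlen, (List.nodup_cons.mp hpnd).2, ?_⟩
        intro y hy
        rw [← List.erase_eq_eraseIdx_of_idxOf rfl]
        apply (List.mem_erase_of_ne ?_).mpr (hsub y (by simp [hy]))
        rintro rfl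
        exact (List.nodup_cons.mp hpnd).1 hy

theorem perms_nodup (k : Nat) : ∀ (pool : List Int), pool.Nodup →
    (PySem.List.permutations pool k).Nodup := by
  induction k with
  | zero => intro pool _; rw [perms_zero]; simp
  | succ k ih =>
    intro pool hnd
    rw [perms_succ]
    rw [List.nodup_flatMap]
    constructor
    · intro i hi
      rw [List.mem_range] at hi
      rw [List.getElem?_eq_getElem hi]
      exact (ih _ (hnd.eraseIdx i)).map List.cons_injective
    · have hpw : (List.range pool.length).Pairwise (· < ·) := List.pairwise_lt_range
      have hpw2 := List.Pairwise.and_mem.mp hpw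
      apply hpw2.imp
      rintro i j ⟨hi, hj, hij⟩
      rw [List.mem_range] at hi hj
      simp only [Function.onFun]
      rw [List.getElem?_eq_getElem hi, List.getElem?_eq_getElem hj]
      rw [List.disjoint_left]
      intro p hp1 hp2
      obtain ⟨q, _, rfl⟩ := List.mem_map.mp hp1
      obtain ⟨q', _, heq⟩ := List.mem_map.mp hp2
      injection heq with h1 _
      exact absurd ((hnd.getElem_inj_iff).mp h1.symm) (by omega)

-- ---- the two candidate lists are permutations of each other ----

theorem main_perm (pool : List Int) (hpos : ∀ x ∈ pool, 0 < x) (hnd : pool.Nodup)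
    (r : Int) (zc : Nat) (hz : 1 ≤ zc) :
    ((possNums pool r (zc : Int) [] []).flatMap permsA).Perm
      ((PySem.List.permutations pool zc).filter (fun p => decide (p.sum = r))) := by
  have hchar : ∀ S, S ∈ possNums pool r (zc : Int) [] [] ↔
      S.Sublist pool ∧ S.sum = r ∧ S.length = zc := by
    intro S
    rw [((poss_mem pool hpos r (zc : Int) [] S).1)]
    constructor
    · rintro ⟨u, hu, rfl, hsum, hlen⟩
      refine ⟨by simpa using hu, by simpa using hsum, ?_⟩
      have h := hlen
      simp only [List.nil_append, List.length_nil, Nat.cast_zero, zero_add] at h ⊢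
      exact_mod_cast h
    · rintro ⟨hu, hsum, hlen⟩
      exact ⟨S, hu, by simp, by simpa using hsum, by simp [hlen]⟩
  have hScons : ∀ S, S ∈ possNums pool r (zc : Int) [] [] → S ≠ [] := by
    intro S hS hnil
    obtain ⟨_, _, hlen⟩ := (hchar S).mp hS
    rw [hnil] at hlen
    have : (0 : Nat) = zc := by simpa using hlen
    omega
  apply (List.perm_ext_iff_of_nodup ?_ ?_).mpr
  · intro p
    rw [List.mem_flatMap, List.mem_filter]
    constructor
    · rintro ⟨S, hS, hp⟩
      obtain ⟨hsub, hsum, hlen⟩ := (hchar S).mp hS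
      have hperm := (permsA_mem S (hScons S hS) p).mp hp
      refine ⟨(perms_mem zc pool hnd p).mpr ⟨hperm.length_eq.trans hlen,
        hperm.nodup_iff.mpr (hsub.nodup hnd), fun x hx => hsub.mem (hperm.mem_iff.mp hx)⟩, ?_⟩
      simp [hperm.sum_eq, hsum]
    · rintro ⟨hmem, hsum⟩
      obtain ⟨hlen, hpnd, hsub⟩ := (perms_mem zc pool hnd p).mp hmem
      simp only [decide_eq_true_eq] at hsum
      set S := pool.filter (fun x => decide (x ∈ p)) with hSdef
      have hSsub : S.Sublist pool := List.filter_sublist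
      have hSperm : S.Perm p := by
        apply (List.perm_ext_iff_of_nodup (hSsub.nodup hnd) hpnd).mpr
        intro x
        rw [hSdef, List.mem_filter]
        simp only [decide_eq_true_eq]
        exact ⟨fun h => h.2, fun h => ⟨hsub x h, h⟩⟩
      have hSmem : S ∈ possNums pool r (zc : Int) [] [] := by
        rw [hchar S]
        exact ⟨hSsub, hSperm.sum_eq.trans hsum, hSperm.length_eq.trans hlen⟩
      exact ⟨S, hSmem, (permsA_mem S (hScons S hSmem) p).mpr hSperm.symm⟩
  · rw [List.nodup_flatMap]
    constructor
    · intro S hS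
      exact permsA_nodup S (hScons S hS)
        ((((hchar S).mp hS).1).nodup hnd)
    · have hnodup := (poss_nodup pool hpos hnd r (zc : Int) []).1
      have := List.Pairwise.and_mem.mp hnodup
      apply this.imp
      rintro S1 S2 ⟨hS1, hS2, hne⟩
      simp only [Function.onFun]
      rw [List.disjoint_left]
      intro p hp1 hp2
      have h1 := (permsA_mem S1 (hScons _ hS1) p).mp hp1
      have h2 := (permsA_mem S2 (hScons _ hS2) p).mp hp2
      exact hne ((List.Nodup.perm_iff_eq_of_sublist hnd ((hchar S1).mp hS1).1
        ((hchar S2).mp hS2).1).mp (h1.symm.trans h2))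
  · exact (perms_nodup zc pool hnd).filter _

-- zero-slot-free shortfall: A's search returns nothing.
theorem possLoop_len0 (nums : List Int) : ∀ (r : Int) (res : List (List Int)),
    possLoop nums r 0 [] res = res := by
  induction nums with
  | nil => intro r res; rw [possLoop_nil]
  | cons j rest ih =>
    intro r res
    rw [possLoop_cons, possNums_eq]
    rw [if_pos (by simp)]
    exact ih r res

theorem possNums_zero_len (pool : List Int) (r : Int) (hr : r ≠ 0) :
    possNums pool r 0 [] [] = [] := by
  rw [possNums_eq]
  split_ifs with h1 h2
  · rfl
  · exfalso; exact hr (by simpa using h2.1.symm)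
  · exact possLoop_len0 pool r []

-- ===== VERDICT (by name: the statement is the Claim_ definition above) =====
theorem cells_from_partial_spec : Claim_equal_cells_from_partial := by
  intro total partial_ _
  unfold Spec_cells_from_partial
  unfold cells_from_partial cells_from_partial_alt
  rw [preproc_rel partial_ (PySem.List.pyRange 1 10 1) (PySem.List.len partial_) total 0]
  cases hB : preprocB partial_ (PySem.List.pyRange 1 10 1) total 0 with
  | none => simp
  | some x =>
    obtain ⟨pool, r, z⟩ := x
    obtain ⟨hz, hr, hnd', hsub'⟩ :=
      preprocB_facts partial_ (PySem.List.pyRange 1 10 1) total 0 pool r z hB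
    have hRange : PySem.List.pyRange 1 10 1 = [1, 2, 3, 4, 5, 6, 7, 8, 9] := by decide
    have hnd : pool.Nodup := hnd' (by rw [hRange]; decide)
    have hpos : ∀ x ∈ pool, 0 < x := by
      intro x hx
      have := hsub' x hx
      rw [hRange] at this
      fin_cases this <;> norm_num
    have hcount : z = PySem.List.count partial_ 0 := by simpa using hz
    simp only [Option.map_some]
    have hsimp : PySem.List.len partial_ - PySem.List.len partial_ + ((z : Int) - (0 : Nat)) = (z : Int) := by
      simp
    rw [hsimp]
    by_cases hc : z = 0 ∧ partial_.sum = total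
    · rw [if_pos (by rw [hcount] at hc; exact ⟨by exact_mod_cast hc.1, hc.2⟩), if_pos hc]
    · rw [if_neg (by rw [hcount] at hc; intro h; exact hc ⟨by exact_mod_cast h.1, h.2⟩), if_neg hc]
      rcases Nat.eq_zero_or_pos z with hz0 | hz1
      · -- no zero slots but sum ≠ total: both sides are empty
        subst hz0
        have hsumne : partial_.sum ≠ total := fun h => hc ⟨rfl, h⟩
        have hrne : r ≠ 0 := by rw [hr]; intro h; exact hsumne (by omega)
        rw [Nat.cast_zero, possNums_zero_len pool r hrne]
        rw [perms_zero]
        simp only [List.foldl_cons, List.foldl_nil, List.sum_nil]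
        rw [if_neg (fun h => hrne h.symm)]
      · -- at least one zero slot: the two searches produce the same multiset
        rw [PySem.List.foldl_append_eq_flatMap permsA (possNums pool r (z : Int) [] []) []]
        rw [PySem.List.foldl_append_singleton_eq_map (fun poss => substA poss partial_ 0)]
        have hB2 : (fun (res : List (List Int)) perm =>
            if perm.sum = r then res ++ [substB partial_ perm] else res) =
            (fun res perm => if (fun (p : List Int) => decide (p.sum = r)) perm = true
              then res ++ [substB partial_ perm] else res) := by
          funext res perm
          simp
        rw [hB2, PySem.List.foldl_append_if (fun p => decide (p.sum = r)) (substB partial_)]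
        simp only [List.nil_append]
        apply sorted_id_congr_perm
        have hsubst : ∀ poss, substA poss partial_ 0 = substB partial_ poss := by
          intro poss
          rw [substA_eq_substB partial_ poss 0, List.drop_zero]
        rw [show (fun poss => substA poss partial_ 0) = substB partial_ from funext hsubst]
        exact (main_perm pool hpos hnd r z hz1).map (substB partial_)
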